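-- pv_equiv track=rewrite | github.com/MUKUL-PRASAD-SIGH/X-FORECAST | src/models/hierarchical/hierarchical_forecaster.py | _group_locations_to_regions
-- ===== SOURCE A (Python) =====
-- from typing import Dict, List, Optional, Tuple, Any
--
-- def _group_locations_to_regions(locations: List[str]) -> Dict[str, List[str]]:
--     """Group locations into regions based on naming patterns or geography"""
--     regions = {}
--     for location in locations:
--         # Simple grouping by first letter or prefix
--         region = f"region_{location[0].upper()}"
--         if region not in regions:
--             regions[region] = []
--         regions[region].append(location)
--     return regions
-- ===== SOURCE B (Python) =====
-- def _group_locations_to_regions(locations):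
--     """Group locations into regions based on naming patterns or geography"""
--     keys = list(dict.fromkeys(f"region_{loc[0].upper()}" for loc in locations))
--     return {k: [loc for loc in locations if f"region_{loc[0].upper()}" == k] for k in keys}
-- ===== Notes on version B (the rewrite author's own statement) =====
-- stated objective: alternative
-- what changed: B replaces A's single-pass dict build (insert-empty-then-append per element) with a two-phase plan: dedup the region keys in first-occurrence order, then build each region's list by filtering the input per key.
import Mathlib
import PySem

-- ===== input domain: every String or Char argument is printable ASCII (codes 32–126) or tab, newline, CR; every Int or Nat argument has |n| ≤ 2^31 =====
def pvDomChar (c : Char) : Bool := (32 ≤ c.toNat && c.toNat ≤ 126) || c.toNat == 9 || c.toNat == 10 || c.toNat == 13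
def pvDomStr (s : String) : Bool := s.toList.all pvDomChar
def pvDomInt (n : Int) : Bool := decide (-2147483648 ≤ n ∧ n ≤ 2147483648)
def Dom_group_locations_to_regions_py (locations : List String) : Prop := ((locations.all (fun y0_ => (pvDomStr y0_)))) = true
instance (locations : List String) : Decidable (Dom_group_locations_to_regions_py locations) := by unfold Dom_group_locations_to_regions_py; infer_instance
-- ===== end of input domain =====

-- B builds the grouping by deduplicating region keys first and then filtering the input per key,
-- instead of A's single-pass dict build; alternative decomposition, same return value.


-- ===== PORT A =====
-- f"region_{location[0].upper()}"; the none branch is unreachable under Pre_ (Python raises IndexError there)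
def pvRegionKey (location : String) : String :=
  match PySem.Str.pyGet? location 0 with
  | some c => "region_" ++ String.ofList [PySem.Chars.upperChar c]
  | none => "region_"

def group_locations_to_regions_py (locations : List String) : List (String × List String) :=
  (locations.foldl (fun regions location =>
      let region := pvRegionKey location
      let regions := if regions.contains region then regions else regions.insert region []
      regions.modify region [] (fun xs => xs ++ [location]))
    PySem.Dict.empty).items

-- ===== PORT B =====
def group_locations_to_regions_py_alt (locations : List String) : List (String × List String) :=
  let keys := PySem.List.dedup (locations.map pvRegionKey)
  keys.map (fun k => (k, locations.filter (fun loc => pvRegionKey loc == k)))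

-- ===== PRECONDITION & SPEC =====
-- Pre_ excludes lists containing the empty string, on which Python A raises IndexError (location[0]).
def Pre_group_locations_to_regions_py (locations : List String) : Prop :=
  ∀ l ∈ locations, l ≠ ""
instance (locations : List String) : Decidable (Pre_group_locations_to_regions_py locations) := by unfold Pre_group_locations_to_regions_py; infer_instance
def pvWitness_group_locations_to_regions_py : List String := (["NYC", "newark", "Boston", "nashua"])
def Spec_group_locations_to_regions_py (locations : List String) (out : List (String × List String)) : Prop := out = group_locations_to_regions_py_alt locations
instance (locations : List String) (out : List (String × List String)) : Decidable (Spec_group_locations_to_regions_py locations out) := by unfold Spec_group_locations_to_regions_py; infer_instance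

-- ===== CLAIM (what is proved, stated in full; the proofs are below) =====
def Claim_equal_group_locations_to_regions_py : Prop := ∀ (locations : List String), Dom_group_locations_to_regions_py locations → Pre_group_locations_to_regions_py locations → Spec_group_locations_to_regions_py locations (group_locations_to_regions_py locations)

-- ===== LEMMAS AND PROOFS =====

-- A's loop body ("insert [] if absent, then append") collapses to a single Dict.modify.
theorem pvStep_not_contains (d : PySem.Dict String (List String)) (k x : String) (h : d.contains k = false) :
    ((d.insert k []).modify k [] (fun xs => xs ++ [x])) = d.modify k [] (fun xs => xs ++ [x]) := by
  simp only [PySem.Dict.modify, PySem.Dict.insert, h, Bool.false_eq_true, ↓reduceIte, PySem.Dict.contains_mk,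
    List.any_append, List.any_cons, BEq.rfl, List.any_nil, Bool.or_false, Bool.or_true, beq_iff_eq, List.map_append,
    List.map_cons, List.map_nil, PySem.Dict.mk.injEq, List.append_singleton_inj, Prod.mk.injEq,
    List.append_cancel_right_eq, true_and]
  have hmem : ∀ p ∈ d.items, p.1 ≠ k := by
    intro p hp hpk
    simp [PySem.Dict.contains] at h
    exact absurd (h p.1 p.2 hp) (by simp [hpk])
  have e : ({ items := d.items ++ [(k, []) ] } : PySem.Dict String (List String)) = d.insert k [] := by
    apply PySem.Dict.ext
    rw [PySem.Dict.items_insert_of_not_contains]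
    exact h
  refine ⟨?_, ?_⟩
  · calc List.map _ d.items = List.map id d.items :=
          List.map_congr_left (fun p hp => by simp [hmem p hp])
      _ = d.items := List.map_id _
  · rw [e, PySem.Dict.getD_insert_self]
    exact (PySem.Dict.getD_of_not_contains d [] h).symm

theorem pvStep_eq_modify (d : PySem.Dict String (List String)) (k x : String) :
    ((if d.contains k then d else d.insert k []).modify k [] (fun xs => xs ++ [x]))
      = d.modify k [] (fun xs => xs ++ [x]) := by
  by_cases h : d.contains k = true
  · simp [h]
  · simp only [h, Bool.false_eq_true, ↓reduceIte]
    exact pvStep_not_contains d k _ (by simpa using h)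

-- Characterisation of A's dict fold: its items are exactly B's key-dedup-then-filter table.
theorem pvFold_items (locations : List String) :
    (locations.foldl (fun d x => d.modify (pvRegionKey x) [] (fun xs => xs ++ [x]))
      (PySem.Dict.empty : PySem.Dict String (List String))).items
    = (PySem.List.dedup (locations.map pvRegionKey)).map
        (fun k => (k, locations.filter (fun loc => pvRegionKey loc == k))) := by
  have hnd : (locations.foldl (fun d x => d.modify (pvRegionKey x) [] (fun xs => xs ++ [x]))
      (PySem.Dict.empty : PySem.Dict String (List String))).keys.Nodup :=
    PySem.Dict.nodup_keys_foldl_modify_key locations pvRegionKey []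
      (fun _ x => fun xs => xs ++ [x]) _ (by simp)
  rw [PySem.Dict.items_eq_map_keys _ hnd []]
  have hkeys : (locations.foldl (fun d x => d.modify (pvRegionKey x) [] (fun xs => xs ++ [x]))
      (PySem.Dict.empty : PySem.Dict String (List String))).keys
      = PySem.List.dedup (locations.map pvRegionKey) := by
    rw [PySem.Dict.keys_foldl_modify_key]
    simp [PySem.Set.update, PySem.Set.ofList_eq_foldl, PySem.Dict.keys_empty, PySem.List.dedup_eq_ofList]
  rw [hkeys]
  apply List.map_congr_left
  intro k hk
  have hfold : locations.foldl (fun d x => d.modify (pvRegionKey x) [] (fun xs => xs ++ [x]))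
      (PySem.Dict.empty : PySem.Dict String (List String))
      = (locations.map (fun x => (pvRegionKey x, x))).foldl
          (fun d p => d.modify p.1 [] (fun xs => xs ++ [p.2])) PySem.Dict.empty := by
    rw [List.foldl_map]
  rw [hfold, PySem.Dict.getD_foldl_modify_append]
  simp [List.filter_map, Function.comp_def]

-- ===== VERDICT (by name: the statement is the Claim_ definition above) =====
theorem group_locations_to_regions_py_spec : Claim_equal_group_locations_to_regions_py := by
  intro locations _ _
  unfold Spec_group_locations_to_regions_py group_locations_to_regions_py group_locations_to_regions_py_alt
  have h1 : List.foldl (fun (regions : PySem.Dict String (List String)) location =>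
        (if regions.contains (pvRegionKey location) then regions
         else regions.insert (pvRegionKey location) []).modify (pvRegionKey location) []
          (fun xs => xs ++ [location])) PySem.Dict.empty locations
      = List.foldl (fun d x => d.modify (pvRegionKey x) [] (fun xs => xs ++ [x]))
          PySem.Dict.empty locations :=
    PySem.List.foldl_congr_mem _ _ _ _ (fun d x _ => pvStep_eq_modify d (pvRegionKey x) x)
  exact (congrArg PySem.Dict.items h1).trans (pvFold_items locations)
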